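-- pv_equiv track=rewrite | github.com/violaflora/howard-introcs | Homework 3 - Destructive:non-destructive, pass-by-value:pass-by-ref, and others/order.py | same_order
-- ===== SOURCE A (Python) =====
-- def same_order(original, sample):
--   upper = ""
--   if len(original) == 0:
--     boo = False
--   if len(sample) == 0:
--     boo = True
--   for char in original:
--     if char.isupper():
--       upper += char
--   if sample == upper:
--     boo = True
--   else:
--     boo = False
--   return boo
-- ===== SOURCE B (Python) =====
-- def same_order(original, sample):
--     i = 0
--     for char in original:
--         if char.isupper():
--             if i >= len(sample) or sample[i] != char:
--                 return False
--             i += 1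
--     return i == len(sample)
-- ===== Notes on version B (the rewrite author's own statement) =====
-- stated objective: alternative
-- what changed: Instead of building the uppercase-filtered string and comparing it to sample, B streams through original with an index into sample, failing early on the first mismatch or overflow and checking at the end that sample was fully consumed.
import Mathlib
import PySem

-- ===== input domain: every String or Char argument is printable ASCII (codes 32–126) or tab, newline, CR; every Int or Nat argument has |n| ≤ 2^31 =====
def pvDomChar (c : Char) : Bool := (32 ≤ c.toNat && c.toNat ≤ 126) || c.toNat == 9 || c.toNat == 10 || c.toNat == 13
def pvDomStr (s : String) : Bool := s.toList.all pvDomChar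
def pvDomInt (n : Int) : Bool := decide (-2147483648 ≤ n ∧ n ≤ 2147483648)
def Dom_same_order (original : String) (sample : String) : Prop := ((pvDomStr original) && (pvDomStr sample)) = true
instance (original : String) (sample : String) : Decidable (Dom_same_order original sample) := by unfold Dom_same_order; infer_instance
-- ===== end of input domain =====

-- B replaces A's build-the-uppercase-string-then-compare with a streaming index match over sample (alternative decomposition, same cost).


-- ===== PORT A =====
-- literal port: build `upper` by the same left fold over original's chars, then compare
def same_order (original : String) (sample : String) : Bool :=
  let upper : List Char :=
    original.toList.foldl (fun acc c => if PySem.Chars.isupper c then acc ++ [c] else acc) []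
  -- the two `boo` assignments before the loop are dead in Python (always overwritten)
  if sample.toList = upper then true else false

-- ===== PORT B =====
-- streaming match: walk original, consuming sample on each uppercase char
def sameOrderGo : List Char → List Char → Bool
  | [], rem => rem.isEmpty
  | c :: rest, rem =>
    if PySem.Chars.isupper c then
      match rem with
      | [] => false
      | s :: srest => if s = c then sameOrderGo rest srest else false
    else sameOrderGo rest rem

def same_order_alt (original : String) (sample : String) : Bool :=
  sameOrderGo original.toList sample.toList

-- ===== PRECONDITION & SPEC =====
def Spec_same_order (original : String) (sample : String) (out : Bool) : Prop := out = same_order_alt original sample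
instance (original : String) (sample : String) (out : Bool) : Decidable (Spec_same_order original sample out) := by unfold Spec_same_order; infer_instance

-- ===== CLAIM (what is proved, stated in full; the proofs are below) =====
def Claim_equal_same_order : Prop := ∀ (original : String) (sample : String), Dom_same_order original sample → Spec_same_order original sample (same_order original sample)

-- ===== LEMMAS AND PROOFS =====

theorem foldl_upper_eq_filter (l acc : List Char) :
    l.foldl (fun acc c => if PySem.Chars.isupper c then acc ++ [c] else acc) acc
      = acc ++ l.filter PySem.Chars.isupper := by
  induction l generalizing acc with
  | nil => simp
  | cons c rest ih =>
    simp only [List.foldl_cons, List.filter_cons]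
    by_cases h : PySem.Chars.isupper c <;> simp [h, ih]

theorem sameOrderGo_eq (l rem : List Char) :
    sameOrderGo l rem = decide (rem = l.filter PySem.Chars.isupper) := by
  induction l generalizing rem with
  | nil => cases rem <;> simp [sameOrderGo]
  | cons c rest ih =>
    by_cases h : PySem.Chars.isupper c
    · cases rem with
      | nil => simp [sameOrderGo, h]
      | cons s srest =>
        by_cases hs : s = c <;>
          simp [sameOrderGo, h, hs, ih]
    · simp [sameOrderGo, h, ih]

-- ===== VERDICT (by name: the statement is the Claim_ definition above) =====
theorem same_order_spec : Claim_equal_same_order := by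
  intro original sample _
  unfold Spec_same_order same_order same_order_alt
  rw [sameOrderGo_eq, foldl_upper_eq_filter]
  by_cases h : sample.toList = original.toList.filter PySem.Chars.isupper <;> simp [h]
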